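-- pv_equiv track=rewrite | github.com/cas1m1r/Titleist | DataCollection/parser.py | combine_logs
-- ===== SOURCE A (Python) =====
-- def combine_logs(parsed_logs):
--         # method for combining logs without duplicating data
--         megalog = {}
--         master_list = []
--         for log in parsed_logs:
--                 for ip in log.keys():
--                         if ip not in megalog.keys():
--                                 megalog[ip] = []
--                         master_list.append(ip)
--         master_list = list(set(list(master_list)))
--         len(master_list)
--
--         for log in parsed_logs:
--                 for ip in log.keys():
--                         for domain in log[ip]:
--                                 if domain not in megalog[ip]:
--                                         megalog[ip].append(domain)
--         return megalog
-- ===== SOURCE B (Python) =====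
-- def combine_logs(parsed_logs):
--     # collect all domains per ip (duplicates included), then dedup in one post-pass
--     collected = {}
--     for log in parsed_logs:
--         for ip in log:
--             collected.setdefault(ip, []).extend(log[ip])
--     return {ip: list(dict.fromkeys(domains)) for ip, domains in collected.items()}
-- ===== Notes on version B (the rewrite author's own statement) =====
-- stated objective: simpler
-- what changed: Replaces A's two-phase key-seeding plus per-element membership-guarded list append (and its dead master_list/set/len code) with a single collect pass (setdefault+extend gathering all domains per ip) followed by a separate dedup pass via dict.fromkeys.
import Mathlib
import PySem

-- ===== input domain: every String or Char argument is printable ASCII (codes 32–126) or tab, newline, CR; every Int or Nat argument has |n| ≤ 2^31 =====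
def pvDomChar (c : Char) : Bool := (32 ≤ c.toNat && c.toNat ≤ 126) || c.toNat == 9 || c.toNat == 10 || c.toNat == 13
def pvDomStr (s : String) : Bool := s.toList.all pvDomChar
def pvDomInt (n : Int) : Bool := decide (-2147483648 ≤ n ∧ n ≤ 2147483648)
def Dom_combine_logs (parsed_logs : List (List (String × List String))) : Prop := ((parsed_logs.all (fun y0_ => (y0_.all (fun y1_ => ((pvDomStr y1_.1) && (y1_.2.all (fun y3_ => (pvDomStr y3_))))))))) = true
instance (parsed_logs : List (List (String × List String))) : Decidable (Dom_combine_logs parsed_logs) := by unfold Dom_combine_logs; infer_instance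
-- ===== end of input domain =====

-- B replaces A's two-phase seed-then-membership-guarded-append (plus A's dead master_list code)
-- by one collect pass and a separate dedup (dict.fromkeys) pass: simpler.
-- Dicts are association lists per the type convention (lookup = first match).

-- ===== PORT A =====
def combine_logs (parsed_logs : List (List (String × List String))) : List (String × List String) :=
  -- first loop: seed megalog keys and build master_list
  let st := parsed_logs.foldl
    (fun (st : PySem.Dict String (List String) × List String) log =>
      log.foldl (fun st p =>
        ((if st.1.contains p.1 then st.1 else st.1.insert p.1 []), st.2 ++ [p.1])) st)
    (PySem.Dict.empty, [])
  let megalog := st.1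
  -- master_list = list(set(master_list)); len(master_list) — dead code in A, kept as values
  let master_list : List String := PySem.Set.ofList st.2
  let _ := master_list.length
  -- second loop: membership-guarded append of each domain of log[ip]
  let megalog := parsed_logs.foldl
    (fun meg log =>
      log.foldl (fun (meg : PySem.Dict String (List String)) p =>
        ((PySem.Dict.mk log).getD p.1 []).foldl
          (fun meg domain =>
            if (meg.getD p.1 []).contains domain then meg
            else meg.insert p.1 (meg.getD p.1 [] ++ [domain])) meg) meg)
    megalog
  megalog.items

-- ===== PORT B =====
def combine_logs_alt (parsed_logs : List (List (String × List String))) : List (String × List String) :=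
  -- collect pass: collected.setdefault(ip, []).extend(log[ip])
  let collected : PySem.Dict String (List String) := parsed_logs.foldl
    (fun col log =>
      log.foldl (fun (col : PySem.Dict String (List String)) p =>
        col.insert p.1 (col.getD p.1 [] ++ (PySem.Dict.mk log).getD p.1 [])) col)
    PySem.Dict.empty
  -- dedup pass: {ip: list(dict.fromkeys(domains)) ...}
  collected.items.map (fun p => (p.1, PySem.List.dedup p.2))

-- ===== PRECONDITION & SPEC =====
def Spec_combine_logs (parsed_logs : List (List (String × List String))) (out : List (String × List String)) : Prop := out = combine_logs_alt parsed_logs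
instance (parsed_logs : List (List (String × List String))) (out : List (String × List String)) : Decidable (Spec_combine_logs parsed_logs out) := by unfold Spec_combine_logs; infer_instance

-- ===== CLAIM (what is proved, stated in full; the proofs are below) =====
def Claim_equal_combine_logs : Prop := ∀ (parsed_logs : List (List (String × List String))), Dom_combine_logs parsed_logs → Spec_combine_logs parsed_logs (combine_logs parsed_logs)

-- ===== LEMMAS AND PROOFS =====

-- the flat stream of (ip, log[ip]) events both programs process, in order
def pvEvents (parsed_logs : List (List (String × List String))) : List (String × List String) :=
  parsed_logs.flatMap (fun log => log.map (fun p => (p.1, (PySem.Dict.mk log).getD p.1 [])))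

-- per-key concatenation (in stream order) of all domains seen for key k
def pvAllDoms (E : List (String × List String)) (k : String) : List String :=
  (E.filter (fun e => e.1 == k)).flatMap Prod.snd

-- A's phase-1 dict step, A's phase-2 step, and B's collect step, as steps over one event
def pvSeed (d : PySem.Dict String (List String)) (e : String × List String) : PySem.Dict String (List String) :=
  if d.contains e.1 then d else d.insert e.1 []

def pvFill (d : PySem.Dict String (List String)) (e : String × List String) : PySem.Dict String (List String) :=
  e.2.foldl (fun d domain =>
    if (d.getD e.1 []).contains domain then d
    else d.insert e.1 (d.getD e.1 [] ++ [domain])) d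

def pvColl (d : PySem.Dict String (List String)) (e : String × List String) : PySem.Dict String (List String) :=
  d.insert e.1 (d.getD e.1 [] ++ e.2)

-- a nested per-log loop that only uses (ip, log[ip]) is the fold over the flat event stream
theorem pv_nest {α : Type} (s : α → (String × List String) → α)
    (parsed_logs : List (List (String × List String))) (init : α) :
    parsed_logs.foldl (fun a log => log.foldl (fun a p => s a (p.1, (PySem.Dict.mk log).getD p.1 [])) a) init
      = (pvEvents parsed_logs).foldl s init := by
  induction parsed_logs generalizing init with
  | nil => rfl
  | cons log rest ih =>
      simp only [List.foldl_cons, pvEvents, List.flatMap_cons, List.foldl_append, List.foldl_map]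
      exact ih _

theorem pv_seed_keys (E : List (String × List String)) (d : PySem.Dict String (List String)) :
    (E.foldl pvSeed d).keys = PySem.Set.update d.keys (E.map Prod.fst) := by
  induction E generalizing d with
  | nil => rfl
  | cons e rest ih =>
      simp only [List.foldl_cons, List.map_cons, PySem.Set.update, List.foldl_cons, ih]
      congr 1
      by_cases h : d.contains e.1 = true
      · have hm : e.1 ∈ d.keys := (PySem.Dict.contains_iff_mem_keys d e.1).mp h
        simp [pvSeed, h, PySem.Set.add, hm]
      · simp only [Bool.not_eq_true] at h
        have hm : e.1 ∉ d.keys := fun hm => by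
          simp [(PySem.Dict.contains_iff_mem_keys d e.1).mpr hm] at h
        simp [pvSeed, h, PySem.Set.add, hm, PySem.Dict.keys_insert_of_not_contains d _ h]

theorem pv_seed_getD (E : List (String × List String)) (d : PySem.Dict String (List String))
    (h : ∀ k, d.getD k [] = []) (k : String) : (E.foldl pvSeed d).getD k [] = [] := by
  induction E generalizing d with
  | nil => exact h k
  | cons e rest ih =>
      refine ih _ (fun k' => ?_)
      by_cases hc : d.contains e.1 = true
      · simp [pvSeed, hc, h k']
      · simp only [Bool.not_eq_true] at hc
        simp [pvSeed, hc, PySem.Dict.getD_insert, h k']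

theorem pv_fill_keys_one (doms : List String) (k : String) (d : PySem.Dict String (List String))
    (h : d.contains k = true) :
    (doms.foldl (fun d domain =>
      if (d.getD k []).contains domain then d
      else d.insert k (d.getD k [] ++ [domain])) d).keys = d.keys := by
  induction doms generalizing d with
  | nil => rfl
  | cons x rest ih =>
      simp only [List.foldl_cons]
      by_cases hx : (d.getD k []).contains x = true
      · rw [if_pos hx]
        exact ih d h
      · simp only [Bool.not_eq_true] at hx
        rw [hx, if_neg (by simp)]
        rw [ih _ (by simp)]
        exact PySem.Dict.keys_insert_of_contains d _ h

theorem pv_fill_keys (E : List (String × List String)) (d : PySem.Dict String (List String))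
    (h : ∀ e ∈ E, d.contains e.1 = true) : (E.foldl pvFill d).keys = d.keys := by
  induction E generalizing d with
  | nil => rfl
  | cons e rest ih =>
      simp only [List.foldl_cons]
      have hk : (pvFill d e).keys = d.keys := pv_fill_keys_one e.2 e.1 d (h e (by simp))
      rw [ih _ (fun e' he' => by
        rw [PySem.Dict.contains_iff_mem_keys, hk, ← PySem.Dict.contains_iff_mem_keys]
        exact h e' (by simp [he'])), hk]

theorem pv_fill_getD_one (doms : List String) (k : String) (d : PySem.Dict String (List String)) (j : String) :
    (doms.foldl (fun d domain =>
      if (d.getD k []).contains domain then d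
      else d.insert k (d.getD k [] ++ [domain])) d).getD j []
      = if j = k then PySem.Set.update (d.getD k []) doms else d.getD j [] := by
  induction doms generalizing d with
  | nil => by_cases h : j = k <;> simp [PySem.Set.update, h]
  | cons x rest ih =>
      have hupd_cons : ∀ (s : List String) (x : String) (l : List String),
          PySem.Set.update s (x :: l) = PySem.Set.update (PySem.Set.add s x) l := fun _ _ _ => rfl
      simp only [List.foldl_cons, hupd_cons]
      by_cases hx : (d.getD k []).contains x = true
      · have hx' : x ∈ d.getD k [] := by simpa using hx
        have hadd : PySem.Set.add (d.getD k []) x = d.getD k [] := by simp [PySem.Set.add, hx']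
        rw [if_pos hx, ih d, hadd]
      · have hx' : x ∉ d.getD k [] := by simpa using hx
        have hadd : PySem.Set.add (d.getD k []) x = d.getD k [] ++ [x] := by simp [PySem.Set.add, hx']
        rw [if_neg hx, ih _]
        by_cases h : j = k <;> simp [h, PySem.Dict.getD_insert, hadd]

theorem pv_fill_getD (E : List (String × List String)) (d : PySem.Dict String (List String)) (k : String) :
    (E.foldl pvFill d).getD k [] = PySem.Set.update (d.getD k []) (pvAllDoms E k) := by
  induction E generalizing d with
  | nil => simp [pvAllDoms, PySem.Set.update]
  | cons e rest ih =>
      simp only [List.foldl_cons, ih, pvAllDoms, List.filter_cons]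
      by_cases he : e.1 = k
      · simp only [he, beq_self_eq_true, if_pos, List.flatMap_cons]
        rw [show (pvFill d e).getD k [] = PySem.Set.update (d.getD k []) e.2 by
              simpa [pvFill, he] using pv_fill_getD_one e.2 e.1 d k]
        simp [PySem.Set.update, List.foldl_append]
      · have hb : (e.1 == k) = false := by simp [he]
        simp only [hb, Bool.false_eq_true, if_false]
        rw [show (pvFill d e).getD k [] = d.getD k [] by
              simpa [pvFill, Ne.symm he] using pv_fill_getD_one e.2 e.1 d k]

theorem pv_coll_getD (E : List (String × List String)) (d : PySem.Dict String (List String)) (k : String) :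
    (E.foldl pvColl d).getD k [] = d.getD k [] ++ pvAllDoms E k := by
  induction E generalizing d with
  | nil => simp [pvAllDoms]
  | cons e rest ih =>
      simp only [List.foldl_cons, ih, pvAllDoms, List.filter_cons]
      by_cases he : e.1 = k
      · simp [pvColl, he]
      · have hb : (e.1 == k) = false := by simp [he]
        simp [pvColl, PySem.Dict.getD_insert, Ne.symm he, hb]

-- the core fact: A's filled dict lists items (k, dedup (all domains for k)) over the same keys as B's collected dict
theorem pv_main (E : List (String × List String)) :
    (E.foldl pvFill (E.foldl pvSeed PySem.Dict.empty)).items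
      = ((E.foldl pvColl PySem.Dict.empty).items).map (fun p => (p.1, PySem.List.dedup p.2)) := by
  have hupd : ∀ l : List String, PySem.Set.update ([] : List String) l = PySem.Set.ofList l := by
    intro l; rw [PySem.Set.ofList_eq_foldl]; rfl
  have h1k : (E.foldl pvSeed PySem.Dict.empty).keys = PySem.Set.ofList (E.map Prod.fst) := by
    rw [pv_seed_keys, PySem.Dict.keys_empty, hupd]
  have hcont : ∀ e ∈ E, (E.foldl pvSeed PySem.Dict.empty).contains e.1 = true := by
    intro e he
    refine (PySem.Dict.contains_iff_mem_keys _ _).mpr ?_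
    rw [h1k]
    exact (PySem.Set.mem_ofList _ _).mpr (List.mem_map_of_mem he)
  have h2k : (E.foldl pvFill (E.foldl pvSeed PySem.Dict.empty)).keys = PySem.Set.ofList (E.map Prod.fst) := by
    rw [pv_fill_keys E _ hcont, h1k]
  have h2g : ∀ k, (E.foldl pvFill (E.foldl pvSeed PySem.Dict.empty)).getD k []
      = PySem.List.dedup (pvAllDoms E k) := by
    intro k
    rw [pv_fill_getD, pv_seed_getD E _ (fun k' => PySem.Dict.getD_empty k' []), hupd,
      PySem.List.dedup_eq_ofList]
  have hck : (E.foldl pvColl PySem.Dict.empty).keys = PySem.Set.ofList (E.map Prod.fst) := by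
    rw [show (E.foldl pvColl PySem.Dict.empty).keys
          = PySem.Set.update PySem.Dict.empty.keys (E.map Prod.fst) from
        PySem.Dict.keys_foldl_insert_key E Prod.fst (fun d e => d.getD e.1 [] ++ e.2) _,
      PySem.Dict.keys_empty, hupd]
  have hcg : ∀ k, (E.foldl pvColl PySem.Dict.empty).getD k [] = pvAllDoms E k := by
    intro k; rw [pv_coll_getD, PySem.Dict.getD_empty]; rfl
  rw [PySem.Dict.items_eq_map_keys _ (h2k ▸ PySem.Set.nodup_ofList _) [],
    PySem.Dict.items_eq_map_keys _ (hck ▸ PySem.Set.nodup_ofList _) [],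
    h2k, hck, List.map_map]
  refine List.map_congr_left (fun k _ => ?_)
  simp [h2g k, hcg k]

-- ===== VERDICT (by name: the statement is the Claim_ definition above) =====
theorem combine_logs_spec : Claim_equal_combine_logs := by
  intro parsed_logs _
  unfold Spec_combine_logs
  show combine_logs parsed_logs = combine_logs_alt parsed_logs
  have hA1 : parsed_logs.foldl
      (fun (st : PySem.Dict String (List String) × List String) log =>
        log.foldl (fun st p =>
          ((if st.1.contains p.1 then st.1 else st.1.insert p.1 []), st.2 ++ [p.1])) st)
      (PySem.Dict.empty, [])
      = ((pvEvents parsed_logs).foldl pvSeed PySem.Dict.empty,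
         (pvEvents parsed_logs).foldl (fun l (e : String × List String) => l ++ [e.1]) []) := by
    rw [show (fun (st : PySem.Dict String (List String) × List String) log =>
          log.foldl (fun st p =>
            ((if st.1.contains p.1 then st.1 else st.1.insert p.1 []), st.2 ++ [p.1])) st)
        = (fun (st : PySem.Dict String (List String) × List String)
             (log : List (String × List String)) =>
            log.foldl (fun st p =>
              (pvSeed st.1 (p.1, (PySem.Dict.mk log).getD p.1 []),
               (fun l (e : String × List String) => l ++ [e.1]) st.2
                 (p.1, (PySem.Dict.mk log).getD p.1 []))) st) from rfl,
      pv_nest (fun st e => (pvSeed st.1 e, (fun l (e : String × List String) => l ++ [e.1]) st.2 e))]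
    exact PySem.List.foldl_prod_mk pvSeed (fun l (e : String × List String) => l ++ [e.1]) _ _ _
  have hA2 : ∀ d : PySem.Dict String (List String), parsed_logs.foldl
      (fun meg log =>
        log.foldl (fun (meg : PySem.Dict String (List String)) p =>
          ((PySem.Dict.mk log).getD p.1 []).foldl
            (fun meg domain =>
              if (meg.getD p.1 []).contains domain then meg
              else meg.insert p.1 (meg.getD p.1 [] ++ [domain])) meg) meg) d
      = (pvEvents parsed_logs).foldl pvFill d :=
    fun d => pv_nest pvFill parsed_logs d
  have hB : parsed_logs.foldl
      (fun col log =>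
        log.foldl (fun (col : PySem.Dict String (List String)) p =>
          col.insert p.1 (col.getD p.1 [] ++ (PySem.Dict.mk log).getD p.1 [])) col)
      PySem.Dict.empty
      = (pvEvents parsed_logs).foldl pvColl PySem.Dict.empty :=
    pv_nest pvColl parsed_logs PySem.Dict.empty
  simp only [combine_logs, combine_logs_alt]
  rw [hA1, hB, hA2]
  exact pv_main (pvEvents parsed_logs)
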